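-- pv_equiv track=rewrite | github.com/Scisaga/addr-resolver | resolver.py | build_structured_fields
-- ===== SOURCE A (Python) =====
-- from typing import Dict, List, Any
--
-- def build_structured_fields(raw_address: str, structured: Any) -> Dict[str, str]:
--     fields = {"C": "", "D": "", "AP": "", "U": "", "I": "", "T": ""}
--
--     if not isinstance(structured, dict):
--         return fields
--
--     tags = structured.get("tags")
--     if not isinstance(tags, dict):
--         return fields
--
--     alias_to_field = {
--         "prov": "C",
--         "city": "C",
--         "district": "D",
--         "town": "D",
--         "community": "D",
--         "village_group": "D",
--         "devzone": "AP",
--         "road": "AP",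
--         "roadno": "AP",
--         "intersection": "AP",
--         "poi": "AP",
--         "subpoi": "AP",
--         "houseno": "AP",
--         "cellno": "U",
--         "floorno": "U",
--         "roomno": "U",
--         "detail": "U",
--         "assist": "I",
--         "distance": "I",
--         "direction": "I",
--     }
--
--     collected: Dict[str, List[str]] = {"C": [], "D": [], "AP": [], "U": [], "I": [], "T": []}
--
--     for key, value in tags.items():
--         if not isinstance(key, str):
--             continue
--         key_stripped = key.strip()
--         key_lower = key_stripped.lower()
--         target = alias_to_field.get(key_lower)
--         if not target and key_stripped in fields:
--             target = key_stripped
--         if not target: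
--             continue
--         values = value if isinstance(value, list) else [value]
--         for item in values:
--             if item is None:
--                 continue
--             text = str(item).strip()
--             if not text:
--                 continue
--             if text not in collected[target]:
--                 collected[target].append(text)
--
--     for field in collected:
--         if collected[field]:
--             if field == "C":
--                 fields[field] = collected[field][0]
--             else:
--                 fields[field] = "".join(collected[field])
--
--     return fields
-- ===== SOURCE B (Python) =====
-- # Two-phase rewrite: first flatten tags into an ordered (target, text) pair list,
-- # then assemble each field by a grouping scan with a seen-set for first-seen dedup.
-- ALIAS_TO_FIELD = {
--     "prov": "C",
--     "city": "C",
--     "district": "D",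
--     "town": "D",
--     "community": "D",
--     "village_group": "D",
--     "devzone": "AP",
--     "road": "AP",
--     "roadno": "AP",
--     "intersection": "AP",
--     "poi": "AP",
--     "subpoi": "AP",
--     "houseno": "AP",
--     "cellno": "U",
--     "floorno": "U",
--     "roomno": "U",
--     "detail": "U",
--     "assist": "I",
--     "distance": "I",
--     "direction": "I",
-- }
--
-- FIELD_ORDER = ("C", "D", "AP", "U", "I", "T")
--
--
-- def _resolve_target(key):
--     stripped = key.strip()
--     target = ALIAS_TO_FIELD.get(stripped.lower())
--     if target is None and stripped in FIELD_ORDER: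
--         target = stripped
--     return target
--
--
-- def build_structured_fields(raw_address, structured):
--     fields = {f: "" for f in FIELD_ORDER}
--
--     if not isinstance(structured, dict):
--         return fields
--     tags = structured.get("tags")
--     if not isinstance(tags, dict):
--         return fields
--
--     pairs = []
--     for key, value in tags.items():
--         if not isinstance(key, str):
--             continue
--         target = _resolve_target(key)
--         if target is None:
--             continue
--         for item in (value if isinstance(value, list) else [value]):
--             if item is None:
--                 continue
--             text = str(item).strip()
--             if text:
--                 pairs.append((target, text))
--
--     for field in FIELD_ORDER:
--         seen = set()
--         texts = []
--         for target, text in pairs: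
--             if target == field and text not in seen:
--                 seen.add(text)
--                 texts.append(text)
--         if texts:
--             fields[field] = texts[0] if field == "C" else "".join(texts)
--
--     return fields
-- ===== Notes on version B (the rewrite author's own statement) =====
-- stated objective: alternative
-- what changed: A fills six per-field lists in lockstep inside one tags loop with inline dedup against the growing list; B first flattens tags into one ordered (target, text) pair list and then assembles each field by a separate grouping scan over that list, deduping with a seen-set.
import Mathlib
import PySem

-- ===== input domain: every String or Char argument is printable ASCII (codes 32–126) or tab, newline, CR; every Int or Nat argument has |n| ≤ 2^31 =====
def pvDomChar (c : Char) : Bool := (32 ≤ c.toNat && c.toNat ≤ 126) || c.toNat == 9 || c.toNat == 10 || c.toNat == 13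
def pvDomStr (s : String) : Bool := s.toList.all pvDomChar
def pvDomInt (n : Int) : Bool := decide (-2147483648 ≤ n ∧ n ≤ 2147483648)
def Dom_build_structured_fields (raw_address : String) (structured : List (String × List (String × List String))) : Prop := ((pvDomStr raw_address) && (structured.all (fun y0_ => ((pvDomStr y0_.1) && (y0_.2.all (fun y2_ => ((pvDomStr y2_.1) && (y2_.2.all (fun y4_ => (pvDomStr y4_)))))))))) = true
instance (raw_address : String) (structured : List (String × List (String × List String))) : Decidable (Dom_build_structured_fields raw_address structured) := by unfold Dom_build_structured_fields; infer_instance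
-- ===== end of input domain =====

-- B restructures A's single lockstep pass (dict of six lists with inline dedup) into a flat
-- ordered (target, text) pair list plus a per-field grouping scan; same return value, similar cost.

-- ===== PORT A =====
-- A's alias_to_field dict literal.
def pvA_alias : PySem.Dict String String := PySem.Dict.ofList [
  ("prov", "C"), ("city", "C"),
  ("district", "D"), ("town", "D"), ("community", "D"), ("village_group", "D"),
  ("devzone", "AP"), ("road", "AP"), ("roadno", "AP"), ("intersection", "AP"),
  ("poi", "AP"), ("subpoi", "AP"), ("houseno", "AP"),
  ("cellno", "U"), ("floorno", "U"), ("roomno", "U"), ("detail", "U"),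
  ("assist", "I"), ("distance", "I"), ("direction", "I")]

def pvFields0 : PySem.Dict String String :=
  PySem.Dict.ofList [("C", ""), ("D", ""), ("AP", ""), ("U", ""), ("I", ""), ("T", "")]

def pvCol0 : PySem.Dict String (List String) :=
  PySem.Dict.ofList [("C", []), ("D", []), ("AP", []), ("U", []), ("I", []), ("T", [])]

-- body of A's inner `for item in values` loop: append the stripped text if new
def pvAinner (target : String) (c : PySem.Dict String (List String)) (item : String) :
    PySem.Dict String (List String) :=
  let text := PySem.Str.strip item
  if text = "" then c
  else if (c.getD target []).contains text then c
  else c.modify target [] (fun l => l ++ [text])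

-- body of A's `for key, value in tags.items()` loop
def pvAtag (col : PySem.Dict String (List String)) (kv : String × List String) :
    PySem.Dict String (List String) :=
  let key_stripped := PySem.Str.strip kv.1
  let key_lower := PySem.Str.lower key_stripped
  let target? : Option String :=
    match pvA_alias.get? key_lower with
    | some t => some t
    | none => if pvFields0.contains key_stripped then some key_stripped else none
  match target? with
  | none => col
  | some target => kv.2.foldl (pvAinner target) col

-- body of A's final `for field in collected` write-back loop
def pvFdstep (fd : PySem.Dict String String) (p : String × List String) : PySem.Dict String String :=
  if p.2 ≠ [] then
    fd.insert p.1 (if p.1 = "C" then p.2.headD "" else PySem.Str.join "" p.2)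
  else fd

-- Transliteration of A (loop bodies are the named helpers above, step for step).  Under the type
-- convention keys are always str, values always list[str] and items never None, so those
-- isinstance/None branches of A are vacuously true here; `structured` and `tags` enter as Python
-- dicts (PySem.Dict.ofList).  `collected[target]` is read with getD [] / modify (target is always
-- one of the six keys, so Python's KeyError path is unreachable) and `collected[field][0]` is
-- headD "" (guarded by the non-emptiness test, exactly as in A).
def build_structured_fields (raw_address : String) (structured : List (String × List (String × List String))) : List (String × String) :=
  match (PySem.Dict.ofList structured).get? "tags" with
  | none => pvFields0.items
  | some tagsL =>
    let collected := (PySem.Dict.ofList tagsL).items.foldl pvAtag pvCol0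
    (collected.items.foldl pvFdstep pvFields0).items

-- ===== PORT B =====
-- B's module constants ALIAS_TO_FIELD and FIELD_ORDER.
def pvB_alias : PySem.Dict String String := PySem.Dict.ofList [
  ("prov", "C"), ("city", "C"),
  ("district", "D"), ("town", "D"), ("community", "D"), ("village_group", "D"),
  ("devzone", "AP"), ("road", "AP"), ("roadno", "AP"), ("intersection", "AP"),
  ("poi", "AP"), ("subpoi", "AP"), ("houseno", "AP"),
  ("cellno", "U"), ("floorno", "U"), ("roomno", "U"), ("detail", "U"),
  ("assist", "I"), ("distance", "I"), ("direction", "I")]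

def pvFIELDS : List String := ["C", "D", "AP", "U", "I", "T"]

-- Source B's _resolve_target.
def pvB_resolve (key : String) : Option String :=
  let stripped := PySem.Str.strip key
  match pvB_alias.get? (PySem.Str.lower stripped) with
  | some t => some t
  | none => if pvFIELDS.contains stripped then some stripped else none

-- Source B's first phase: the flat ordered (target, text) pair list.
def pvB_pairs (tags : List (String × List String)) : List (String × String) :=
  tags.foldl (fun acc kv =>
    match pvB_resolve kv.1 with
    | none => acc
    | some target =>
      kv.2.foldl (fun a item =>
        let text := PySem.Str.strip item
        if text ≠ "" then a ++ [(target, text)] else a) acc) []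

-- Source B's second phase for one field: collect matching texts, deduping with a seen-set.
def pvB_collect (field : String) (pairs : List (String × String)) : List String :=
  (pairs.foldl (fun (st : PySem.Set String × List String) p =>
      if p.1 = field ∧ ¬ PySem.Set.contains st.1 p.2 then
        (PySem.Set.add st.1 p.2, st.2 ++ [p.2])
      else st)
    (PySem.Set.empty, [])).2

-- Transliteration of Source B; the returned fields dict (keys FIELD_ORDER, values assembled per
-- field) is its items list.  texts[0] is headD "" under the same non-emptiness guard.
def build_structured_fields_alt (raw_address : String) (structured : List (String × List (String × List String))) : List (String × String) :=
  match (PySem.Dict.ofList structured).get? "tags" with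
  | none => pvFIELDS.map (fun f => (f, ""))
  | some tagsL =>
    let pairs := pvB_pairs (PySem.Dict.ofList tagsL).items
    pvFIELDS.map (fun f =>
      let texts := pvB_collect f pairs
      (f, if texts = [] then "" else if f = "C" then texts.headD "" else PySem.Str.join "" texts))

-- ===== PRECONDITION & SPEC =====
def Spec_build_structured_fields (raw_address : String) (structured : List (String × List (String × List String))) (out : List (String × String)) : Prop := out = build_structured_fields_alt raw_address structured
instance (raw_address : String) (structured : List (String × List (String × List String))) (out : List (String × String)) : Decidable (Spec_build_structured_fields raw_address structured out) := by unfold Spec_build_structured_fields; infer_instance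

-- ===== CLAIM (what is proved, stated in full; the proofs are below) =====
def Claim_equal_build_structured_fields : Prop := ∀ (raw_address : String) (structured : List (String × List (String × List String))), Dom_build_structured_fields raw_address structured → Spec_build_structured_fields raw_address structured (build_structured_fields raw_address structured)

-- ===== LEMMAS AND PROOFS =====

-- reference semantics shared by the two proofs: ordered first-seen dedup over the pair stream
def pvDstep (acc : List String) (x : String) : List String :=
  if x ∈ acc then acc else acc ++ [x]

def pvCollect (f : String) (acc : List String) (pairs : List (String × String)) : List String :=
  pairs.foldl (fun a p => if p.1 = f then pvDstep a p.2 else a) acc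

def pvTexts (vs : List String) : List String :=
  (vs.map PySem.Str.strip).filter (fun x => x ≠ "")

def pvEmit (kv : String × List String) : List (String × String) :=
  match pvB_resolve kv.1 with
  | none => []
  | some t => (pvTexts kv.2).map (fun x => (t, x))

lemma pv_contains_fields (ks : String) : pvFields0.contains ks = pvFIELDS.contains ks := by
  have hk : pvFields0.keys = pvFIELDS := by decide
  rw [PySem.Dict.contains_eq_decide_mem_keys, hk, List.contains_eq_mem]

-- A's inline target computation is Source B's _resolve_target
lemma pv_target_eq (k : String) :
    (match pvA_alias.get? (PySem.Str.lower (PySem.Str.strip k)) with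
     | some t => some t
     | none =>
        if pvFields0.contains (PySem.Str.strip k) then some (PySem.Str.strip k) else none)
      = pvB_resolve k := by
  unfold pvB_resolve
  dsimp only
  rw [pv_contains_fields]
  have halias : pvA_alias = pvB_alias := rfl
  rw [halias]

lemma pv_get_mem_values {k t : String} :
    ∀ (l : List (String × String)), (PySem.Dict.mk l).get? k = some t → t ∈ l.map Prod.snd := by
  intro l
  induction l with
  | nil => intro h; simp [PySem.Dict.get?] at h
  | cons p rest ih =>
      obtain ⟨a, b⟩ := p
      intro h
      rw [PySem.Dict.get?_mk_cons] at h
      by_cases hab : (a == k) = true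
      · simp only [hab, if_true, Option.some.injEq] at h
        simp [h]
      · simp only [hab, if_false, Bool.false_eq_true] at h
        simp [ih h]

-- every target pvB_resolve yields is one of the six fields
lemma pv_resolve_mem {key t : String} (h : pvB_resolve key = some t) : t ∈ pvFIELDS := by
  unfold pvB_resolve at h
  dsimp only at h
  rcases hg : pvB_alias.get? (PySem.Str.lower (PySem.Str.strip key)) with _ | t' <;>
    rw [hg] at h
  · split_ifs at h with hc
    · cases h
      rw [List.contains_eq_mem] at hc
      exact of_decide_eq_true hc
  · cases h
    have hv : t ∈ pvB_alias.items.map Prod.snd := pv_get_mem_values pvB_alias.items hg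
    have hall : ∀ x ∈ pvB_alias.items.map Prod.snd, x ∈ pvFIELDS := by decide
    exact hall _ hv

-- ---- B side ----
lemma pvCollect_cons (f : String) (acc : List String) (p : String × String)
    (rest : List (String × String)) :
    pvCollect f acc (p :: rest) = pvCollect f (if p.1 = f then pvDstep acc p.2 else acc) rest := rfl

lemma pvB_collect_aux (f : String) :
    ∀ (pairs : List (String × String)) (s : List String),
      (pairs.foldl (fun (st : PySem.Set String × List String) p =>
          if p.1 = f ∧ ¬ PySem.Set.contains st.1 p.2 then
            (PySem.Set.add st.1 p.2, st.2 ++ [p.2])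
          else st) (s, s)).2
        = pvCollect f s pairs := by
  intro pairs
  induction pairs with
  | nil => intro s; simp [pvCollect]
  | cons p rest ih =>
      intro s
      rw [List.foldl_cons, pvCollect_cons]
      by_cases h1 : p.1 = f
      · by_cases h2 : p.2 ∈ s
        · simpa [h1, h2, pvDstep] using ih s
        · have hadd : PySem.Set.add s p.2 = s ++ [p.2] := by
            simp [PySem.Set.add, PySem.Set.contains_eq_decide, h2]
          simpa [h1, h2, hadd, pvDstep] using ih (s ++ [p.2])
      · simpa [h1] using ih s

lemma pvB_collect_eq (f : String) (pairs : List (String × String)) :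
    pvB_collect f pairs = pvCollect f [] pairs := by
  unfold pvB_collect
  exact pvB_collect_aux f pairs []

lemma pvTexts_cons (v : String) (vs : List String) :
    pvTexts (v :: vs) =
      if PySem.Str.strip v = "" then pvTexts vs else PySem.Str.strip v :: pvTexts vs := by
  by_cases hv : PySem.Str.strip v = "" <;> simp [pvTexts, hv]

lemma pvB_pairs_inner (t : String) :
    ∀ (vs : List String) (a : List (String × String)),
      vs.foldl (fun a item =>
          let text := PySem.Str.strip item
          if text ≠ "" then a ++ [(t, text)] else a) a
        = a ++ (pvTexts vs).map (fun x => (t, x)) := by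
  intro vs
  induction vs with
  | nil => intro a; simp [pvTexts]
  | cons v rest ih =>
      intro a
      rw [List.foldl_cons, pvTexts_cons, ih]
      by_cases hv : PySem.Str.strip v = "" <;> simp [hv]

lemma pvB_pairs_aux :
    ∀ (tags : List (String × List String)) (acc : List (String × String)),
      tags.foldl (fun acc kv =>
          match pvB_resolve kv.1 with
          | none => acc
          | some target =>
            kv.2.foldl (fun a item =>
              let text := PySem.Str.strip item
              if text ≠ "" then a ++ [(target, text)] else a) acc) acc
        = acc ++ tags.flatMap pvEmit := by
  intro tags
  induction tags with
  | nil => intro acc; simp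
  | cons kv rest ih =>
      intro acc
      rw [List.foldl_cons, List.flatMap_cons]
      rcases hres : pvB_resolve kv.1 with _ | t
      · simp only [hres, pvEmit]
        rw [ih]
        simp
      · simp only [hres, pvEmit]
        rw [pvB_pairs_inner, ih]
        simp
  
lemma pvB_pairs_eq (tags : List (String × List String)) :
    pvB_pairs tags = tags.flatMap pvEmit := by
  unfold pvB_pairs
  rw [pvB_pairs_aux]
  simp

-- ---- A side ----
lemma pvCollect_append (f : String) (acc : List String) (xs ys : List (String × String)) :
    pvCollect f acc (xs ++ ys) = pvCollect f (pvCollect f acc xs) ys := by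
  simp [pvCollect, List.foldl_append]

lemma pvCollect_emit (f t : String) (acc : List String) (ws : List String) :
    pvCollect f acc (ws.map (fun x => (t, x)))
      = if t = f then ws.foldl pvDstep acc else acc := by
  unfold pvCollect
  rw [List.foldl_map]
  by_cases hft : t = f
  · simp [hft]
  · simp [hft, List.foldl_fixed]

lemma pvA_inner (t f : String) :
    ∀ (vs : List String) (c : PySem.Dict String (List String)),
      ((vs.foldl (pvAinner t) c).getD f [])
        = if f = t then (pvTexts vs).foldl pvDstep (c.getD f []) else c.getD f [] := by
  intro vs
  induction vs with
  | nil => intro c; by_cases h : f = t <;> simp [pvTexts, h]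
  | cons v rest ih =>
      intro c
      rw [List.foldl_cons, pvTexts_cons]
      by_cases hv : PySem.Str.strip v = ""
      · have hstep : pvAinner t c v = c := by simp [pvAinner, hv]
        rw [hstep, ih, if_pos hv]
      · rw [if_neg hv]
        by_cases hm : PySem.Str.strip v ∈ c.getD t []
        · have hstep : pvAinner t c v = c := by
            simp [pvAinner, hv, hm, List.contains_eq_mem]
          rw [hstep, ih]
          by_cases hft : f = t
          · rw [if_pos hft, if_pos hft, List.foldl_cons, hft]
            have hd : pvDstep (c.getD t []) (PySem.Str.strip v) = c.getD t [] := by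
              simp [pvDstep, hm]
            rw [hd]
          · rw [if_neg hft, if_neg hft]
        · have hstep : pvAinner t c v = c.modify t [] (fun l => l ++ [PySem.Str.strip v]) := by
            simp [pvAinner, hv, hm, List.contains_eq_mem]
          rw [hstep, ih]
          by_cases hft : f = t
          · rw [if_pos hft, if_pos hft, List.foldl_cons, hft, PySem.Dict.getD_modify]
            have hd : pvDstep (c.getD t []) (PySem.Str.strip v)
                = c.getD t [] ++ [PySem.Str.strip v] := by
              simp [pvDstep, hm]
            simp [hd]
          · rw [if_neg hft, if_neg hft, PySem.Dict.getD_modify, if_neg hft]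

lemma pvA_fold (f : String) :
    ∀ (E : List (String × List String)) (col : PySem.Dict String (List String)),
      (E.foldl pvAtag col).getD f [] = pvCollect f (col.getD f []) (E.flatMap pvEmit) := by
  intro E
  induction E with
  | nil => intro col; simp [pvCollect]
  | cons kv rest ih =>
      intro col
      rw [List.foldl_cons, List.flatMap_cons, pvCollect_append, ih]
      have htag : pvAtag col kv =
          match pvB_resolve kv.1 with
          | none => col
          | some target => kv.2.foldl (pvAinner target) col := by
        unfold pvAtag
        dsimp only
        rw [pv_target_eq]
      have hkv : (pvAtag col kv).getD f [] = pvCollect f (col.getD f []) (pvEmit kv) := by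
        rcases hres : pvB_resolve kv.1 with _ | t
        · rw [htag]
          simp [hres, pvEmit, pvCollect]
        · rw [htag]
          simp only [hres, pvEmit]
          rw [pvA_inner, pvCollect_emit]
          by_cases hft : f = t
          · simp [hft]
          · rw [if_neg hft, if_neg (fun h : t = f => hft h.symm)]
      rw [hkv]

lemma pvAinner_keys (t : String) (ht : t ∈ pvFIELDS) :
    ∀ (vs : List String) (c : PySem.Dict String (List String)),
      c.keys = pvFIELDS → (vs.foldl (pvAinner t) c).keys = pvFIELDS := by
  intro vs
  induction vs with
  | nil => intro c hc; simpa using hc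
  | cons v rest ih =>
      intro c hc
      rw [List.foldl_cons]
      apply ih
      have hcont : c.contains t = true := by
        rw [PySem.Dict.contains_eq_decide_mem_keys, hc]
        exact decide_eq_true ht
      unfold pvAinner
      dsimp only
      split_ifs
      · exact hc
      · exact hc
      · rw [PySem.Dict.keys_modify, PySem.Dict.keys_insert_of_contains _ _ hcont]
        exact hc

lemma pvA_keys :
    ∀ (E : List (String × List String)) (col : PySem.Dict String (List String)),
      col.keys = pvFIELDS → (E.foldl pvAtag col).keys = pvFIELDS := by
  intro E
  induction E with
  | nil => intro col hc; simpa using hc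
  | cons kv rest ih =>
      intro col hc
      rw [List.foldl_cons]
      apply ih
      have htag : pvAtag col kv =
          match pvB_resolve kv.1 with
          | none => col
          | some target => kv.2.foldl (pvAinner target) col := by
        unfold pvAtag
        dsimp only
        rw [pv_target_eq]
      rcases hres : pvB_resolve kv.1 with _ | t
      · rw [htag]; simpa [hres] using hc
      · rw [htag]
        simp only [hres]
        exact pvAinner_keys t (pv_resolve_mem hres) kv.2 col hc

lemma pvFd_keys (fd : PySem.Dict String String) (g : String) (L : List String)
    (h : fd.keys = pvFIELDS) (hg : g ∈ pvFIELDS) : (pvFdstep fd (g, L)).keys = pvFIELDS := by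
  have hcont : fd.contains g = true := by
    rw [PySem.Dict.contains_eq_decide_mem_keys, h]
    exact decide_eq_true hg
  unfold pvFdstep
  split_ifs <;> simp [PySem.Dict.keys_insert_of_contains _ _ hcont, h]

lemma pvFd_getD (fd : PySem.Dict String String) (g f : String) (L : List String) :
    (pvFdstep fd (g, L)).getD f ""
      = if f = g ∧ L ≠ [] then (if g = "C" then L.headD "" else PySem.Str.join "" L)
        else fd.getD f "" := by
  unfold pvFdstep
  by_cases hL : L = [] <;> by_cases hf : f = g <;>
    simp [hL, hf, PySem.Dict.getD_insert]

-- the final write-back loop over collected.items, with symbolic per-field lists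
lemma pvA_final (LC LD LAP LU LI LT : List String) :
    (List.foldl pvFdstep pvFields0
        [("C", LC), ("D", LD), ("AP", LAP), ("U", LU), ("I", LI), ("T", LT)]).items
      = [("C", if LC = [] then "" else LC.headD ""),
         ("D", if LD = [] then "" else PySem.Str.join "" LD),
         ("AP", if LAP = [] then "" else PySem.Str.join "" LAP),
         ("U", if LU = [] then "" else PySem.Str.join "" LU),
         ("I", if LI = [] then "" else PySem.Str.join "" LI),
         ("T", if LT = [] then "" else PySem.Str.join "" LT)] := by
  have hk0 : pvFields0.keys = pvFIELDS := by decide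
  have hkeys : (List.foldl pvFdstep pvFields0
      [("C", LC), ("D", LD), ("AP", LAP), ("U", LU), ("I", LI), ("T", LT)]).keys = pvFIELDS := by
    simp only [List.foldl_cons, List.foldl_nil]
    apply pvFd_keys _ _ _ ?_ (by decide)
    apply pvFd_keys _ _ _ ?_ (by decide)
    apply pvFd_keys _ _ _ ?_ (by decide)
    apply pvFd_keys _ _ _ ?_ (by decide)
    apply pvFd_keys _ _ _ ?_ (by decide)
    exact pvFd_keys _ _ _ hk0 (by decide)
  have hnd : (List.foldl pvFdstep pvFields0
      [("C", LC), ("D", LD), ("AP", LAP), ("U", LU), ("I", LI), ("T", LT)]).keys.Nodup := by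
    rw [hkeys]; decide
  rw [PySem.Dict.items_eq_map_keys _ hnd "", hkeys]
  have hbase : ∀ f : String, f ∈ pvFIELDS → pvFields0.getD f "" = "" := by decide
  simp only [pvFIELDS, List.map_cons, List.map_nil, List.foldl_cons, List.foldl_nil]
  simp only [pvFd_getD]
  simp only [show ("C" : String) ≠ "D" from by decide, show ("C" : String) ≠ "AP" from by decide,
    show ("C" : String) ≠ "U" from by decide, show ("C" : String) ≠ "I" from by decide,
    show ("C" : String) ≠ "T" from by decide, show ("D" : String) ≠ "C" from by decide,
    show ("D" : String) ≠ "AP" from by decide, show ("D" : String) ≠ "U" from by decide,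
    show ("D" : String) ≠ "I" from by decide, show ("D" : String) ≠ "T" from by decide,
    show ("AP" : String) ≠ "C" from by decide, show ("AP" : String) ≠ "D" from by decide,
    show ("AP" : String) ≠ "U" from by decide, show ("AP" : String) ≠ "I" from by decide,
    show ("AP" : String) ≠ "T" from by decide, show ("U" : String) ≠ "C" from by decide,
    show ("U" : String) ≠ "D" from by decide, show ("U" : String) ≠ "AP" from by decide,
    show ("U" : String) ≠ "I" from by decide, show ("U" : String) ≠ "T" from by decide,
    show ("I" : String) ≠ "C" from by decide, show ("I" : String) ≠ "D" from by decide,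
    show ("I" : String) ≠ "AP" from by decide, show ("I" : String) ≠ "U" from by decide,
    show ("I" : String) ≠ "T" from by decide, show ("T" : String) ≠ "C" from by decide,
    show ("T" : String) ≠ "D" from by decide, show ("T" : String) ≠ "AP" from by decide,
    show ("T" : String) ≠ "U" from by decide, show ("T" : String) ≠ "I" from by decide]
  simp [hbase "C" (by decide), hbase "D" (by decide), hbase "AP" (by decide),
    hbase "U" (by decide), hbase "I" (by decide), hbase "T" (by decide), ite_not]

-- ===== VERDICT (by name: the statement is the Claim_ definition above) =====
theorem build_structured_fields_spec : Claim_equal_build_structured_fields := by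
  intro raw_address structured _
  unfold Spec_build_structured_fields
  unfold build_structured_fields build_structured_fields_alt
  rcases hget : (PySem.Dict.ofList structured).get? "tags" with _ | tagsL
  · decide
  · dsimp only
    set E := (PySem.Dict.ofList tagsL).items with hE
    have hkeys : (E.foldl pvAtag pvCol0).keys = pvFIELDS := pvA_keys E pvCol0 (by decide)
    have hnd : (E.foldl pvAtag pvCol0).keys.Nodup := by rw [hkeys]; decide
    have hitems : (E.foldl pvAtag pvCol0).items =
        pvFIELDS.map (fun k => (k, (E.foldl pvAtag pvCol0).getD k [])) := by
      rw [PySem.Dict.items_eq_map_keys _ hnd [], hkeys]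
    have hgetD : ∀ f : String, (E.foldl pvAtag pvCol0).getD f []
        = pvCollect f (pvCol0.getD f []) (E.flatMap pvEmit) := fun f => pvA_fold f E pvCol0
    have hB : ∀ f : String, pvB_collect f (pvB_pairs E) = pvCollect f [] (E.flatMap pvEmit) := by
      intro f
      rw [pvB_collect_eq, pvB_pairs_eq]
    have h0 : ∀ f ∈ pvFIELDS, pvCol0.getD f [] = [] := by decide
    rw [hitems]
    simp only [pvFIELDS, List.map_cons, List.map_nil]
    rw [hgetD "C", hgetD "D", hgetD "AP", hgetD "U", hgetD "I", hgetD "T"]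
    rw [h0 "C" (by decide), h0 "D" (by decide), h0 "AP" (by decide), h0 "U" (by decide),
      h0 "I" (by decide), h0 "T" (by decide)]
    rw [pvA_final]
    rw [hB "C", hB "D", hB "AP", hB "U", hB "I", hB "T"]
    simp
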